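-- pv_equiv track=rewrite | github.com/vanniekerkalex/lottery | powerball-plus.py | isDistributedNicely
-- ===== SOURCE A (Python) =====
-- def isDistributedNicely(lottoRow, distributedAreas):
-- 	distDict = {k:0 for k in (10,20,30,40,50)}
--
-- 	for val in lottoRow[:-1]:
-- 		if val <= 10:
-- 			distDict[10] = 1
-- 		elif val <= 20:
-- 			distDict[20] = 1
-- 		elif val <= 30:
-- 			distDict[30] = 1
-- 		elif val <= 40:
-- 			distDict[40] = 1
-- 		else:
-- 			distDict[50] = 1
--
-- 	total = sum(distDict.values())
-- 	if total >= distributedAreas: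
-- 		return True
-- 	return False
-- ===== SOURCE B (Python) =====
-- def isDistributedNicely(lottoRow, distributedAreas):
--     vals = lottoRow[:-1]
--     bands = (
--         lambda v: v <= 10,
--         lambda v: 10 < v <= 20,
--         lambda v: 20 < v <= 30,
--         lambda v: 30 < v <= 40,
--         lambda v: 40 < v,
--     )
--     count = sum(any(test(v) for v in vals) for test in bands)
--     return count >= distributedAreas
-- ===== Notes on version B (the rewrite author's own statement) =====
-- stated objective: simpler
-- what changed: Replaces the stateful presence-dict fold (elif chain writing flags, then summing dict values) with a direct count: for each of the five bands, one any()-scan tests whether the band is occupied, and the occupied-band count is compared to the threshold.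
import Mathlib
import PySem

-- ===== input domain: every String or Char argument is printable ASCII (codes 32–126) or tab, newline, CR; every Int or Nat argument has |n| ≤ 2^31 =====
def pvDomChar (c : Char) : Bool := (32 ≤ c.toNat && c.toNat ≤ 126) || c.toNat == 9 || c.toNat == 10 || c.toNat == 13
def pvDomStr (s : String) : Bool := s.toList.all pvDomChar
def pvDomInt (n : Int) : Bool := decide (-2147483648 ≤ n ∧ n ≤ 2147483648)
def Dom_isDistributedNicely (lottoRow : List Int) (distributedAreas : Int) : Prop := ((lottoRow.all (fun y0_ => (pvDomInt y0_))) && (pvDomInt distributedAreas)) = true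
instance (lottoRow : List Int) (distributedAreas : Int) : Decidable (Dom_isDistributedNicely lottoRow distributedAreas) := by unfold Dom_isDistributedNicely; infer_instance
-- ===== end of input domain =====

-- B replaces the stateful presence-dict fold with five per-band any-scans summed into a count; objective: simpler.


-- ===== PORT A =====
-- the elif-chain loop body writing presence flags into the dict
def pvStep (d : PySem.Dict Int Int) (val : Int) : PySem.Dict Int Int :=
  if val ≤ 10 then d.insert 10 1
  else if val ≤ 20 then d.insert 20 1
  else if val ≤ 30 then d.insert 30 1
  else if val ≤ 40 then d.insert 40 1
  else d.insert 50 1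

def isDistributedNicely (lottoRow : List Int) (distributedAreas : Int) : Bool :=
  let distDict : PySem.Dict Int Int := PySem.Dict.ofList [(10, 0), (20, 0), (30, 0), (40, 0), (50, 0)]
  let finalDict := (PySem.List.slice lottoRow none (some (-1))).foldl pvStep distDict
  let total := finalDict.values.sum
  if total ≥ distributedAreas then true else false

-- ===== PORT B =====
-- the five band tests (low edge strict, high edge inclusive, matching the elif chain)
def pvBands : List (Int → Bool) :=
  [fun v => v ≤ 10, fun v => 10 < v && v ≤ 20, fun v => 20 < v && v ≤ 30,
   fun v => 30 < v && v ≤ 40, fun v => 40 < v]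

def isDistributedNicely_alt (lottoRow : List Int) (distributedAreas : Int) : Bool :=
  let vals := PySem.List.slice lottoRow none (some (-1))
  let count : Int := (pvBands.map (fun t => if vals.any t then (1 : Int) else 0)).sum
  decide (count ≥ distributedAreas)

-- ===== PRECONDITION & SPEC =====
def Spec_isDistributedNicely (lottoRow : List Int) (distributedAreas : Int) (out : Bool) : Prop := out = isDistributedNicely_alt lottoRow distributedAreas
instance (lottoRow : List Int) (distributedAreas : Int) (out : Bool) : Decidable (Spec_isDistributedNicely lottoRow distributedAreas out) := by unfold Spec_isDistributedNicely; infer_instance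

-- ===== CLAIM (what is proved, stated in full; the proofs are below) =====
def Claim_equal_isDistributedNicely : Prop := ∀ (lottoRow : List Int) (distributedAreas : Int), Dom_isDistributedNicely lottoRow distributedAreas → Spec_isDistributedNicely lottoRow distributedAreas (isDistributedNicely lottoRow distributedAreas)

-- ===== LEMMAS AND PROOFS =====

-- the dict A maintains, parameterised by the five presence flags
def pvMkD (b1 b2 b3 b4 b5 : Bool) : PySem.Dict Int Int :=
  PySem.Dict.mk [(10, if b1 then 1 else 0), (20, if b2 then 1 else 0),
                 (30, if b3 then 1 else 0), (40, if b4 then 1 else 0),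
                 (50, if b5 then 1 else 0)]

theorem pvStep_mkD (b1 b2 b3 b4 b5 : Bool) (v : Int) :
    pvStep (pvMkD b1 b2 b3 b4 b5) v =
      pvMkD (b1 || decide (v ≤ 10)) (b2 || (decide (10 < v) && decide (v ≤ 20)))
            (b3 || (decide (20 < v) && decide (v ≤ 30))) (b4 || (decide (30 < v) && decide (v ≤ 40)))
            (b5 || decide (40 < v)) := by
  unfold pvStep pvMkD
  by_cases h1 : v ≤ 10
  · have h2 : ¬ 10 < v := by omega
    have h3 : ¬ 20 < v := by omega
    have h4 : ¬ 30 < v := by omega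
    have h5 : ¬ 40 < v := by omega
    simp [PySem.Dict.insert, h1, h2, h3, h4, h5]
  · by_cases h2 : v ≤ 20
    · have h3 : 10 < v := by omega
      have h4 : ¬ 20 < v := by omega
      have h5 : ¬ 30 < v := by omega
      have h6 : ¬ 40 < v := by omega
      simp [PySem.Dict.insert, h1, h2, h3, h4, h5, h6]
    · by_cases h3 : v ≤ 30
      · have h4 : 20 < v := by omega
        have h5 : ¬ 30 < v := by omega
        have h6 : ¬ 40 < v := by omega
        simp [PySem.Dict.insert, h1, h2, h3, h4, h5, h6]
      · by_cases h4 : v ≤ 40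
        · have h5 : 30 < v := by omega
          have h6 : ¬ 40 < v := by omega
          simp [PySem.Dict.insert, h1, h2, h3, h4, h5, h6]
        · have h5 : 40 < v := by omega
          simp [PySem.Dict.insert, h1, h2, h3, h4, h5]

theorem pvFoldl_mkD (xs : List Int) : ∀ (b1 b2 b3 b4 b5 : Bool),
    xs.foldl pvStep (pvMkD b1 b2 b3 b4 b5) =
      pvMkD (b1 || xs.any (fun v => v ≤ 10)) (b2 || xs.any (fun v => 10 < v && v ≤ 20))
            (b3 || xs.any (fun v => 20 < v && v ≤ 30)) (b4 || xs.any (fun v => 30 < v && v ≤ 40))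
            (b5 || xs.any (fun v => 40 < v)) := by
  induction xs with
  | nil => intro b1 b2 b3 b4 b5; simp
  | cons v xs ih =>
      intro b1 b2 b3 b4 b5
      simp only [List.foldl_cons, pvStep_mkD, ih, List.any_cons, Bool.or_assoc]

theorem pvSum_mkD (b1 b2 b3 b4 b5 : Bool) :
    (pvMkD b1 b2 b3 b4 b5).values.sum =
      (if b1 then (1 : Int) else 0) + ((if b2 then (1 : Int) else 0) + ((if b3 then (1 : Int) else 0)
        + ((if b4 then (1 : Int) else 0) + (if b5 then (1 : Int) else 0)))) := by
  simp [pvMkD, PySem.Dict.values]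

-- ===== VERDICT (by name: the statement is the Claim_ definition above) =====
theorem isDistributedNicely_spec : Claim_equal_isDistributedNicely := by
  intro lottoRow distributedAreas _
  unfold Spec_isDistributedNicely isDistributedNicely isDistributedNicely_alt
  have hinit : PySem.Dict.ofList [((10 : Int), (0 : Int)), (20, 0), (30, 0), (40, 0), (50, 0)] =
      pvMkD false false false false false := by decide
  simp only [hinit, pvFoldl_mkD, pvSum_mkD, pvBands, Bool.false_or, List.map_cons,
    List.map_nil, List.sum_cons, List.sum_nil, ge_iff_le]
  split <;> simp_all
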